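-- pv_equiv track=rewrite | github.com/yeseong31/coding-test | 프로그래머스/2/12905. 가장 큰 정사각형 찾기/가장 큰 정사각형 찾기.py | solution
-- ===== SOURCE A (Python) =====
-- def solution(board):
--     answer = 0
--
--     row, col = len(board), len(board[0])
--     n = max(row, col)
--
--     dp = [[0] * (n + 1) for _ in range(n + 1)]
--
--     for i in range(1, len(board) + 1):
--         for j in range(1, len(board[0]) + 1):
--             if board[i-1][j-1] != 0:
--                 dp[i][j] = min(dp[i][j-1], dp[i-1][j], dp[i-1][j-1]) + 1
--                 answer = max(answer, dp[i][j])
--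
--     return answer ** 2
-- ===== SOURCE B (Python) =====
-- def solution(board):
--     rows, cols = len(board), len(board[0])
--     P = [[0] * (cols + 1) for _ in range(rows + 1)]
--     for i in range(rows):
--         for j in range(cols):
--             P[i + 1][j + 1] = P[i][j + 1] + P[i + 1][j] - P[i][j] + (1 if board[i][j] != 0 else 0)
--     s = min(rows, cols)
--     while s > 0:
--         for i in range(rows - s + 1):
--             for j in range(cols - s + 1):
--                 if P[i + s][j + s] - P[i][j + s] - P[i + s][j] + P[i][j] == s * s:
--                     return s * s
--         s -= 1
--     return 0
-- ===== Notes on version B (the rewrite author's own statement) =====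
-- stated objective: alternative
-- what changed: Replaces the 2D DP table (min of three neighbours per cell) by a 2D prefix-sum table of the nonzero indicator plus a descending search over candidate side lengths s = min(rows,cols)..1, returning s*s for the first s that admits a block whose prefix-sum count equals s*s (an O(1) test per position).
import Mathlib
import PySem

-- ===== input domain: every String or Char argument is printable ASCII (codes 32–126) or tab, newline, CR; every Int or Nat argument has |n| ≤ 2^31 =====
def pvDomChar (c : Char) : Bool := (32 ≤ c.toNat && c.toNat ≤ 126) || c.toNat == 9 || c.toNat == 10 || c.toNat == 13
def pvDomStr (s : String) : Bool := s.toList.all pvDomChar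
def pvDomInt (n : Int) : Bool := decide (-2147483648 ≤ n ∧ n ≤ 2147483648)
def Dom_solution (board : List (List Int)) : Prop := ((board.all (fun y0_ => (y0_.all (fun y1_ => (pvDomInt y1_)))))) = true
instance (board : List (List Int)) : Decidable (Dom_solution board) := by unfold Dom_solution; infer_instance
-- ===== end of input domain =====

-- B replaces A's per-cell DP-table recurrence by a 2D prefix-sum table plus a descending search over candidate side lengths with O(1) block tests; return values proved equal on Pre_ (A raises IndexError outside it).

-- ===== PORT A =====
-- Literal port of A's DP. All table/board reads are in range under Pre_, so getD is exact there.
def solution (board : List (List Int)) : Int :=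
  let row := board.length
  let col := (board.headD []).length
  let n := max row col
  let dp : List (List Int) := (List.range (n + 1)).map (fun _ => List.replicate (n + 1) (0 : Int))
  let res := (List.range' 1 row).foldl (fun st i =>
    (List.range' 1 col).foldl (fun st j =>
      if (board.getD (i - 1) []).getD (j - 1) 0 ≠ 0 then
        let v := min (min ((st.1.getD i []).getD (j - 1) 0) ((st.1.getD (i - 1) []).getD j 0))
                     ((st.1.getD (i - 1) []).getD (j - 1) 0) + 1
        (st.1.set i ((st.1.getD i []).set j v), max st.2 v)
      else st) st) (dp, (0 : Int))
  res.2 ^ 2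

-- ===== PORT B =====
-- the prefix-sum table P: P[i+1][j+1] = P[i][j+1] + P[i+1][j] - P[i][j] + (1 if board[i][j] != 0 else 0)
def pstep (board : List (List Int)) (i : Nat) (P : List (List Int)) (j : Nat) : List (List Int) :=
  P.set (i + 1) ((P.getD (i + 1) []).set (j + 1)
    ((P.getD i []).getD (j + 1) 0 + (P.getD (i + 1) []).getD j 0 - (P.getD i []).getD j 0 +
      (if (board.getD i []).getD j 0 ≠ 0 then 1 else 0)))

def buildP (board : List (List Int)) : List (List Int) :=
  (List.range board.length).foldl
    (fun P i => (List.range (board.headD []).length).foldl (pstep board i) P)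
    ((List.range (board.length + 1)).map
      (fun _ => List.replicate ((board.headD []).length + 1) (0 : Int)))

-- the O(1) block test: P[i+s][j+s] - P[i][j+s] - P[i+s][j] + P[i][j] == s*s
def sqCheck (P : List (List Int)) (i j s : Nat) : Bool :=
  (P.getD (i + s) []).getD (j + s) 0 - (P.getD i []).getD (j + s) 0 -
      (P.getD (i + s) []).getD j 0 + (P.getD i []).getD j 0 == (s : Int) * (s : Int)

-- the two nested position loops for a fixed side s
def sqScan (P : List (List Int)) (rows cols s : Nat) : Bool :=
  (List.range (rows - s + 1)).any (fun i =>
    (List.range (cols - s + 1)).any (fun j => sqCheck P i j s))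

-- the while-loop over s, counting down
def sqLoop (P : List (List Int)) (rows cols : Nat) : Nat → Int
  | 0 => 0
  | s + 1 => if sqScan P rows cols (s + 1) then ((s : Int) + 1) * ((s : Int) + 1)
             else sqLoop P rows cols s

def solution_alt (board : List (List Int)) : Int :=
  let rows := board.length
  let cols := (board.headD []).length
  let P := buildP board
  sqLoop P rows cols (min rows cols)

-- ===== PRECONDITION & SPEC =====
-- Pre_ excludes exactly the inputs where Python A raises IndexError: the empty board (board[0])
-- and boards with a row shorter than board[0] (read board[i-1][j-1] for j-1 < len(board[0])).
def Pre_solution (board : List (List Int)) : Prop :=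
  board ≠ [] ∧ ∀ r ∈ board, (board.headD []).length ≤ r.length
instance (board : List (List Int)) : Decidable (Pre_solution board) := by
  unfold Pre_solution; infer_instance

def pvWitness_solution : List (List Int) := [[1, 1], [1, 0]]

def Spec_solution (board : List (List Int)) (out : Int) : Prop := out = solution_alt board
instance (board : List (List Int)) (out : Int) : Decidable (Spec_solution board out) := by unfold Spec_solution; infer_instance

-- ===== CLAIM (what is proved, stated in full; the proofs are below) =====
def Claim_equal_solution : Prop := ∀ (board : List (List Int)), Dom_solution board → Pre_solution board → Spec_solution board (solution board)

-- ===== LEMMAS AND PROOFS =====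
-- ===== proof-side definitions =====
def cellIn (board : List (List Int)) (i j : Nat) : Int :=
  if i < board.length ∧ j < (board.headD []).length then (board.getD i []).getD j 0 else 0

def F (board : List (List Int)) : Nat → Nat → Int
  | 0, _ => 0
  | _ + 1, 0 => 0
  | i + 1, j + 1 =>
    if cellIn board i j ≠ 0 then
      min (min (F board (i + 1) j) (F board i (j + 1))) (F board i j) + 1
    else 0
termination_by i j => (i, j)

def SqTL (board : List (List Int)) (x y s : Nat) : Prop :=
  ∀ a b, a < s → b < s → cellIn board (x + a) (y + b) ≠ 0

def Sq (board : List (List Int)) (i j s : Nat) : Prop :=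
  s ≤ i ∧ s ≤ j ∧ SqTL board (i - s) (j - s) s

lemma F_succ (board : List (List Int)) (i j : Nat) :
    F board (i + 1) (j + 1) =
      if cellIn board i j ≠ 0 then
        min (min (F board (i + 1) j) (F board i (j + 1))) (F board i j) + 1
      else 0 := by
  rw [F]

lemma F_nonneg (board : List (List Int)) : ∀ i j, 0 ≤ F board i j := by
  intro i j
  induction i generalizing j with
  | zero => simp [F]
  | succ i ih =>
    induction j with
    | zero => simp [F]
    | succ j ihj =>
      rw [F_succ]
      split
      · have h1 := ih (j + 1); have h2 := ih j; have h3 := ihj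
        omega
      · omega

lemma cellIn_lt {board : List (List Int)} {i j : Nat} (h : cellIn board i j ≠ 0) :
    i < board.length ∧ j < (board.headD []).length := by
  by_contra hc
  apply h
  unfold cellIn
  rw [if_neg hc]

lemma cellIn_eq {board : List (List Int)} {i j : Nat}
    (hi : i < board.length) (hj : j < (board.headD []).length) :
    cellIn board i j = (board.getD i []).getD j 0 := by
  unfold cellIn
  rw [if_pos ⟨hi, hj⟩]

lemma sq_step {board : List (List Int)} {i j t : Nat} (h : cellIn board i j ≠ 0) :
    Sq board (i + 1) (j + 1) (t + 1) ↔
      Sq board (i + 1) j t ∧ Sq board i (j + 1) t ∧ Sq board i j t := by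
  constructor
  · rintro ⟨h1, h2, h3⟩
    have hti : t ≤ i := by omega
    have htj : t ≤ j := by omega
    refine ⟨⟨by omega, htj, ?_⟩, ⟨hti, by omega, ?_⟩, ⟨hti, htj, ?_⟩⟩
    · intro a b ha hb
      have e1 : i + 1 - t + a = i + 1 - (t + 1) + (a + 1) := by omega
      have e2 : j - t + b = j + 1 - (t + 1) + b := by omega
      rw [e1, e2]; exact h3 (a + 1) b (by omega) (by omega)
    · intro a b ha hb
      have e1 : i - t + a = i + 1 - (t + 1) + a := by omega
      have e2 : j + 1 - t + b = j + 1 - (t + 1) + (b + 1) := by omega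
      rw [e1, e2]; exact h3 a (b + 1) (by omega) (by omega)
    · intro a b ha hb
      have e1 : i - t + a = i + 1 - (t + 1) + a := by omega
      have e2 : j - t + b = j + 1 - (t + 1) + b := by omega
      rw [e1, e2]; exact h3 a b (by omega) (by omega)
  · rintro ⟨⟨q1a, q1b, q1⟩, ⟨q2a, q2b, q2⟩, ⟨q3a, q3b, q3⟩⟩
    refine ⟨by omega, by omega, ?_⟩
    intro a b ha hb
    rcases Nat.lt_or_ge a t with hat | hat
    · rcases Nat.lt_or_ge b t with hbt | hbt
      · have e1 : i + 1 - (t + 1) + a = i - t + a := by omega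
        have e2 : j + 1 - (t + 1) + b = j - t + b := by omega
        rw [e1, e2]; exact q3 a b hat hbt
      · -- b = t
        have hbe : b = t := by omega
        rcases Nat.eq_zero_or_pos t with ht0 | ht0
        · omega
        · have e1 : i + 1 - (t + 1) + a = i - t + a := by omega
          have e2 : j + 1 - (t + 1) + b = j + 1 - t + (t - 1) := by omega
          rw [e1, e2]; exact q2 a (t - 1) (by omega) (by omega)
    · -- a = t
      have hae : a = t := by omega
      rcases Nat.lt_or_ge b t with hbt | hbt
      · rcases Nat.eq_zero_or_pos t with ht0 | ht0
        · omega
        · have e1 : i + 1 - (t + 1) + a = i + 1 - t + (t - 1) := by omega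
          have e2 : j + 1 - (t + 1) + b = j - t + b := by omega
          rw [e1, e2]; exact q1 (t - 1) b (by omega) (by omega)
      · -- a = t, b = t : the corner cell
        have e1 : i + 1 - (t + 1) + a = i := by omega
        have e2 : j + 1 - (t + 1) + b = j := by omega
        rw [e1, e2]; exact h

lemma F_iff (board : List (List Int)) : ∀ i j (s : Nat), ((s : Int)) ≤ F board i j ↔ Sq board i j s := by
  intro i
  induction i with
  | zero =>
    intro j s
    constructor
    · intro hs
      simp only [F] at hs
      have : s = 0 := by omega
      subst this
      exact ⟨Nat.le_refl 0, Nat.zero_le _, by intro a b ha hb; omega⟩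
    · rintro ⟨h1, -, -⟩
      simp only [F]
      omega
  | succ i ih =>
    intro j
    induction j with
    | zero =>
      intro s
      constructor
      · intro hs
        simp only [F] at hs
        have : s = 0 := by omega
        subst this
        exact ⟨Nat.zero_le _, Nat.le_refl 0, by intro a b ha hb; omega⟩
      · rintro ⟨-, h2, -⟩
        simp only [F]
        omega
    | succ j ihj =>
      intro s
      rw [F_succ]
      by_cases hc : cellIn board i j ≠ 0
      · rw [if_pos hc]
        cases s with
        | zero =>
          have n1 := F_nonneg board (i + 1) j
          have n2 := F_nonneg board i (j + 1)
          have n3 := F_nonneg board i j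
          constructor
          · intro _
            exact ⟨Nat.zero_le _, Nat.zero_le _, by intro a b ha hb; omega⟩
          · intro _
            omega
        | succ t =>
          rw [sq_step hc]
          rw [← ih (j + 1) t, ← ihj t, ← ih j t]
          push_cast
          omega
      · rw [if_neg hc]
        push Not at hc
        constructor
        · intro hs
          have : s = 0 := by omega
          subst this
          exact ⟨Nat.zero_le _, Nat.zero_le _, by intro a b ha hb; omega⟩
        · rintro ⟨h1, h2, h3⟩
          rcases Nat.eq_zero_or_pos s with h | h
          · omega
          · exfalso
            have := h3 (s - 1) (s - 1) (by omega) (by omega)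
            have e1 : i + 1 - s + (s - 1) = i := by omega
            have e2 : j + 1 - s + (s - 1) = j := by omega
            rw [e1, e2] at this
            exact this hc
-- ===== B side =====
lemma SqTL_bounds {board : List (List Int)} {x y s : Nat} (hs : 1 ≤ s) (h : SqTL board x y s) :
    x + s ≤ board.length ∧ y + s ≤ (board.headD []).length := by
  have h1 := cellIn_lt (h (s - 1) 0 (by omega) (by omega))
  have h2 := cellIn_lt (h 0 (s - 1) (by omega) (by omega))
  omega

lemma SqTL_to_Sq {board : List (List Int)} {x y s : Nat} (h : SqTL board x y s) :
    Sq board (x + s) (y + s) s := by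
  refine ⟨by omega, by omega, ?_⟩
  have e1 : x + s - s = x := by omega
  have e2 : y + s - s = y := by omega
  rw [e1, e2]; exact h

lemma Sq_bounds {board : List (List Int)} {i j s : Nat} (hs : 1 ≤ s) (h : Sq board i j s) :
    1 ≤ i ∧ i ≤ board.length ∧ 1 ≤ j ∧ j ≤ (board.headD []).length := by
  obtain ⟨h1, h2, h3⟩ := h
  have hb := SqTL_bounds hs h3
  omega

-- ===== foldl max facts =====
lemma foldl_max_init (l : List Int) (a : Int) : a ≤ l.foldl max a := by
  induction l generalizing a with
  | nil => simp
  | cons x xs ih => exact le_trans (le_max_left a x) (ih (max a x))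

lemma foldl_max_le_of_mem {l : List Int} {x : Int} (h : x ∈ l) (a : Int) :
    x ≤ l.foldl max a := by
  induction l generalizing a with
  | nil => simp at h
  | cons y ys ih =>
    rcases List.mem_cons.1 h with rfl | h'
    · exact le_trans (le_max_right a x) (foldl_max_init ys (max a x))
    · exact ih h' (max a y)

lemma foldl_max_attained (l : List Int) (a : Int) :
    l.foldl max a = a ∨ l.foldl max a ∈ l := by
  induction l generalizing a with
  | nil => simp
  | cons y ys ih =>
    rcases ih (max a y) with h | h
    · simp only [List.foldl_cons, h]
      rcases max_choice a y with h' | h' <;> rw [h']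
      · exact Or.inl rfl
      · exact Or.inr (List.mem_cons_self)
    · exact Or.inr (List.mem_cons_of_mem _ h)

lemma nested_foldl_max (l1 l2 : List Nat) (g : Nat → Nat → Int) (init : Int) :
    l1.foldl (fun m i => l2.foldl (fun m j => max m (g i j)) m) init =
      (l1.flatMap (fun i => l2.map (g i))).foldl max init := by
  induction l1 generalizing init with
  | nil => simp
  | cons x xs ih =>
    simp only [List.foldl_cons, List.flatMap_cons, List.foldl_append, List.foldl_map]
    exact ih _
-- ===== A side: the dp table =====
def tab (dp : List (List Int)) (a b : Nat) : Int := (dp.getD a []).getD b 0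

def ShapeDP (dp : List (List Int)) (r c : Nat) : Prop :=
  dp.length = r ∧ ∀ row ∈ dp, row.length = c

abbrev ProcP (col i j a b : Nat) : Prop :=
  1 ≤ a ∧ 1 ≤ b ∧ b ≤ col ∧ (a < i ∨ (a = i ∧ b ≤ j))

def InvT (board : List (List Int)) (n col i j : Nat) (dp : List (List Int)) : Prop :=
  ShapeDP dp (n + 1) (n + 1) ∧ ∀ a b, tab dp a b = if ProcP col i j a b then F board a b else 0

def istep (board : List (List Int)) (i : Nat) (st : List (List Int) × Int) (j : Nat) :
    List (List Int) × Int :=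
  if (board.getD (i - 1) []).getD (j - 1) 0 ≠ 0 then
    let v := min (min ((st.1.getD i []).getD (j - 1) 0) ((st.1.getD (i - 1) []).getD j 0))
                 ((st.1.getD (i - 1) []).getD (j - 1) 0) + 1
    (st.1.set i ((st.1.getD i []).set j v), max st.2 v)
  else st

def dp0 (r c : Nat) : List (List Int) :=
  (List.range (r + 1)).map (fun _ => List.replicate (c + 1) (0 : Int))

lemma F_zero_right (board : List (List Int)) (i : Nat) : F board i 0 = 0 := by
  cases i <;> rw [F]

lemma F_zero_left (board : List (List Int)) (j : Nat) : F board 0 j = 0 := by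
  rw [F]

lemma row_of_shape {dp : List (List Int)} {r c i : Nat} (hs : ShapeDP dp r c) (hi : i < r) :
    (dp.getD i []).length = c := by
  have hl := hs.1
  have hlt : i < dp.length := by omega
  rw [List.getD_eq_getElem?_getD, List.getElem?_eq_getElem hlt]
  exact hs.2 _ (List.getElem_mem hlt)

lemma shape_set {dp : List (List Int)} {r c i j : Nat} (hs : ShapeDP dp r c) (hi : i < r)
    (v : Int) : ShapeDP (dp.set i ((dp.getD i []).set j v)) r c := by
  constructor
  · rw [List.length_set]; exact hs.1
  · intro r hr
    rcases List.mem_or_eq_of_mem_set hr with h | h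
    · exact hs.2 _ h
    · rw [h, List.length_set]; exact row_of_shape hs hi

lemma tab_set {dp : List (List Int)} {r c i j : Nat} (hs : ShapeDP dp r c) (hi : i < r)
    (hj : j < c) (v : Int) (a b : Nat) :
    tab (dp.set i ((dp.getD i []).set j v)) a b =
      if a = i ∧ b = j then v else tab dp a b := by
  have hl := hs.1
  unfold tab
  simp only [List.getD_eq_getElem?_getD]
  by_cases ha : a = i
  · subst ha
    have hlt : a < dp.length := by omega
    rw [List.getElem?_set_self hlt]
    simp only [Option.getD_some]
    by_cases hb : b = j
    · subst hb
      have hrb : b < (dp[a]?.getD []).length := by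
        have := row_of_shape hs hi
        rw [List.getD_eq_getElem?_getD] at this
        omega
      rw [List.getElem?_set_self hrb]
      simp
    · rw [if_neg (by tauto), List.getElem?_set_ne (by omega)]
  · rw [if_neg (by tauto), List.getElem?_set_ne (by omega)]

lemma tab_dp0 (r c a b : Nat) : tab (dp0 r c) a b = 0 := by
  unfold tab dp0
  simp only [List.getD_eq_getElem?_getD, List.getElem?_map]
  by_cases ha : a < r + 1
  · rw [List.getElem?_range ha]
    simp only [Option.map_some, Option.getD_some]
    by_cases hb : b < c + 1
    · rw [List.getElem?_replicate, if_pos hb]; simp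
    · rw [List.getElem?_eq_none (by rw [List.length_replicate]; omega)]; simp
  · have hnone : (List.range (r + 1))[a]? = none :=
      List.getElem?_eq_none (by rw [List.length_range]; omega)
    rw [hnone]
    simp
lemma inner_inv (board : List (List Int)) (i : Nat) (hi1 : 1 ≤ i) (hir : i ≤ board.length) :
    ∀ (m : Nat), m ≤ (board.headD []).length → ∀ st : List (List Int) × Int,
      InvT board (max board.length (board.headD []).length) (board.headD []).length i 0 st.1 →
      0 ≤ st.2 →
      InvT board (max board.length (board.headD []).length) (board.headD []).length i m
          ((List.range' 1 m).foldl (istep board i) st).1 ∧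
      ((List.range' 1 m).foldl (istep board i) st).2 =
        (List.range' 1 m).foldl (fun acc j => max acc (F board i j)) st.2 ∧
      0 ≤ ((List.range' 1 m).foldl (istep board i) st).2 := by
  intro m
  induction m with
  | zero => intro _ st h1 h2; exact ⟨h1, rfl, h2⟩
  | succ m ih =>
    intro hm st hinv0 hnn0
    obtain ⟨a, rfl⟩ : ∃ a, i = a + 1 := ⟨i - 1, by omega⟩
    rw [List.range'_concat, List.foldl_append, List.foldl_append]
    simp only [List.foldl_cons, List.foldl_nil, Nat.one_mul]
    obtain ⟨hinv, hans, hnn⟩ := ih (by omega) st hinv0 hnn0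
    set S := (List.range' 1 m).foldl (istep board (a + 1)) st with hS
    have hm1 : 1 + m - 1 = m := by omega
    have hb1 : a < board.length := by omega
    have hb2 : m < (board.headD []).length := by omega
    have f1 : (S.1.getD (a + 1) []).getD m 0 = F board (a + 1) m := by
      have h := hinv.2 (a + 1) m
      unfold tab at h
      rw [h]
      by_cases hm0 : m = 0
      · subst hm0
        rw [if_neg (by unfold ProcP; omega), F_zero_right]
      · rw [if_pos (by unfold ProcP; omega)]
    have f2 : (S.1.getD a []).getD (1 + m) 0 = F board a (1 + m) := by
      have h := hinv.2 a (1 + m)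
      unfold tab at h
      rw [h]
      by_cases hi0 : a = 0
      · rw [if_neg (by unfold ProcP; omega), hi0, F_zero_left]
      · rw [if_pos (by unfold ProcP; omega)]
    have f3 : (S.1.getD a []).getD m 0 = F board a m := by
      have h := hinv.2 a m
      unfold tab at h
      rw [h]
      by_cases hi0 : a = 0
      · rw [if_neg (by unfold ProcP; omega), hi0, F_zero_left]
      · by_cases hm0 : m = 0
        · subst hm0
          rw [if_neg (by unfold ProcP; omega), F_zero_right]
        · rw [if_pos (by unfold ProcP; omega)]
    have hFs : F board (a + 1) (1 + m) =
        if cellIn board a m ≠ 0 then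
          min (min (F board (a + 1) m) (F board a (1 + m))) (F board a m) + 1
        else 0 := by
      rw [show 1 + m = m + 1 from by omega]
      exact F_succ board a m
    simp only [istep, Nat.add_sub_cancel]
    rw [hm1]
    rw [show (board.getD a []).getD m 0 = cellIn board a m from (cellIn_eq hb1 hb2).symm]
    by_cases hc : cellIn board a m ≠ 0
    · rw [if_pos hc]
      rw [f1, f2, f3]
      set v : Int := min (min (F board (a + 1) m) (F board a (1 + m))) (F board a m) + 1 with hv
      have hvF : v = F board (a + 1) (1 + m) := by rw [hFs, if_pos hc]
      have hshape := hinv.1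
      have hin : a + 1 < max board.length (board.headD []).length + 1 := by omega
      have hjn : 1 + m < max board.length (board.headD []).length + 1 := by omega
      refine ⟨⟨shape_set hshape hin v, ?_⟩, ?_, ?_⟩
      · intro x y
        rw [tab_set hshape hin hjn v x y]
        by_cases hxy : x = a + 1 ∧ y = 1 + m
        · rw [if_pos hxy, if_pos (by unfold ProcP; omega), hxy.1, hxy.2, hvF]
        · rw [if_neg hxy]
          rw [hinv.2 x y]
          have hiff : ProcP (board.headD []).length (a + 1) m x y ↔
              ProcP (board.headD []).length (a + 1) (1 + m) x y := by
            unfold ProcP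
            omega
          rw [if_congr hiff rfl rfl, Nat.add_comm 1 m]
      · rw [hans, hvF]
      · have h1 := le_max_left S.2 v
        have h2 : (S.1.set (a + 1) ((S.1.getD (a + 1) []).set (1 + m) v), max S.2 v).2 = max S.2 v := rfl
        rw [h2]
        omega
    · rw [if_neg hc]
      have hF0 : F board (a + 1) (1 + m) = 0 := by rw [hFs, if_neg hc]
      refine ⟨⟨hinv.1, ?_⟩, ?_, hnn⟩
      · intro x y
        rw [hinv.2 x y]
        split_ifs with h1 h2
        · rfl
        · exfalso; unfold ProcP at h1 h2; omega
        · have hxy : x = a + 1 ∧ y = 1 + m := by unfold ProcP at *; omega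
          rw [hxy.1, hxy.2, hF0]
        · rfl
      · rw [hans, hF0]
        rw [hans] at hnn
        exact (max_eq_left hnn).symm
lemma dp0_inv (board : List (List Int)) :
    InvT board (max board.length (board.headD []).length) (board.headD []).length 1 0
      (dp0 (max board.length (board.headD []).length) (max board.length (board.headD []).length)) := by
  constructor
  · constructor
    · unfold dp0; rw [List.length_map, List.length_range]
    · intro r hr
      unfold dp0 at hr
      obtain ⟨x, -, rfl⟩ := List.mem_map.1 hr
      exact List.length_replicate
  · intro a b
    rw [tab_dp0]
    rw [if_neg (by unfold ProcP; omega)]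

lemma outer_inv (board : List (List Int)) : ∀ (k : Nat), k ≤ board.length →
    InvT board (max board.length (board.headD []).length) (board.headD []).length (k + 1) 0
      ((List.range' 1 k).foldl
        (fun st i => (List.range' 1 (board.headD []).length).foldl (istep board i) st)
        (dp0 (max board.length (board.headD []).length) (max board.length (board.headD []).length), (0 : Int))).1 ∧
    ((List.range' 1 k).foldl
        (fun st i => (List.range' 1 (board.headD []).length).foldl (istep board i) st)
        (dp0 (max board.length (board.headD []).length) (max board.length (board.headD []).length), (0 : Int))).2 =
      (List.range' 1 k).foldl
        (fun acc i => (List.range' 1 (board.headD []).length).foldl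
          (fun acc j => max acc (F board i j)) acc) 0 ∧
    0 ≤ ((List.range' 1 k).foldl
        (fun st i => (List.range' 1 (board.headD []).length).foldl (istep board i) st)
        (dp0 (max board.length (board.headD []).length) (max board.length (board.headD []).length), (0 : Int))).2 := by
  intro k
  induction k with
  | zero =>
    intro _
    exact ⟨dp0_inv board, rfl, le_refl 0⟩
  | succ k ihk =>
    intro hk
    rw [List.range'_concat, List.foldl_append, List.foldl_append]
    simp only [List.foldl_cons, List.foldl_nil, Nat.one_mul]
    obtain ⟨hinv, hans, hnn⟩ := ihk (by omega)
    set S := (List.range' 1 k).foldl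
        (fun st i => (List.range' 1 (board.headD []).length).foldl (istep board i) st)
        (dp0 (max board.length (board.headD []).length) (max board.length (board.headD []).length), (0 : Int)) with hS
    obtain ⟨hinv', hans', hnn'⟩ :=
      inner_inv board (1 + k) (by omega) (by omega) (board.headD []).length (le_refl _) S
        (by rwa [show 1 + k = k + 1 from by omega]) hnn
    refine ⟨⟨hinv'.1, ?_⟩, ?_, hnn'⟩
    · intro x y
      rw [hinv'.2 x y]
      have hiff : ProcP (board.headD []).length (1 + k) (board.headD []).length x y ↔
          ProcP (board.headD []).length (k + 1 + 1) 0 x y := by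
        unfold ProcP
        omega
      rw [if_congr hiff rfl rfl]
    · rw [hans', hans]
-- ===== prefix-sum side =====
def ind (board : List (List Int)) (i j : Nat) : Int :=
  if cellIn board i j ≠ 0 then 1 else 0

def C (board : List (List Int)) : Nat → Nat → Int
  | 0, _ => 0
  | _ + 1, 0 => 0
  | i + 1, j + 1 => C board i (j + 1) + C board (i + 1) j - C board i j + ind board i j
termination_by i j => (i, j)

lemma C_zero_right (board : List (List Int)) (i : Nat) : C board i 0 = 0 := by
  cases i <;> rw [C]

lemma C_zero_left (board : List (List Int)) (j : Nat) : C board 0 j = 0 := by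
  rw [C]

lemma C_succ (board : List (List Int)) (i j : Nat) :
    C board (i + 1) (j + 1) =
      C board i (j + 1) + C board (i + 1) j - C board i j + ind board i j := by
  rw [C]

def PInv (board : List (List Int)) (i j : Nat) (P : List (List Int)) : Prop :=
  ShapeDP P (board.length + 1) ((board.headD []).length + 1) ∧
  ∀ a b, tab P a b = if ProcP (board.headD []).length i j a b then C board a b else 0

lemma pinner (board : List (List Int)) (r : Nat) (hr : r < board.length) :
    ∀ (m : Nat), m ≤ (board.headD []).length → ∀ P : List (List Int),
      PInv board (r + 1) 0 P →
      PInv board (r + 1) m ((List.range m).foldl (pstep board r) P) := by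
  intro m
  induction m with
  | zero => intro _ P h; exact h
  | succ m ih =>
    intro hm P hinv0
    rw [List.range_succ, List.foldl_append]
    simp only [List.foldl_cons, List.foldl_nil]
    obtain ⟨hshape, htab⟩ := ih (by omega) P hinv0
    set S := (List.range m).foldl (pstep board r) P with hS
    have hb2 : m < (board.headD []).length := by omega
    have g1 : (S.getD r []).getD (m + 1) 0 = C board r (m + 1) := by
      have h := htab r (m + 1)
      unfold tab at h
      rw [h]
      by_cases hr0 : r = 0
      · rw [if_neg (by unfold ProcP; omega), hr0, C_zero_left]
      · rw [if_pos (by unfold ProcP; omega)]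
    have g2 : (S.getD (r + 1) []).getD m 0 = C board (r + 1) m := by
      have h := htab (r + 1) m
      unfold tab at h
      rw [h]
      by_cases hm0 : m = 0
      · subst hm0
        rw [if_neg (by unfold ProcP; omega), C_zero_right]
      · rw [if_pos (by unfold ProcP; omega)]
    have g3 : (S.getD r []).getD m 0 = C board r m := by
      have h := htab r m
      unfold tab at h
      rw [h]
      by_cases hr0 : r = 0
      · rw [if_neg (by unfold ProcP; omega), hr0, C_zero_left]
      · by_cases hm0 : m = 0
        · subst hm0
          rw [if_neg (by unfold ProcP; omega), C_zero_right]
        · rw [if_pos (by unfold ProcP; omega)]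
    have gcell : (if (board.getD r []).getD m 0 ≠ 0 then (1 : Int) else 0) = ind board r m := by
      unfold ind
      rw [cellIn_eq hr hb2]
    simp only [pstep]
    rw [g1, g2, g3, gcell]
    set v : Int := C board r (m + 1) + C board (r + 1) m - C board r m + ind board r m with hv
    have hvC : v = C board (r + 1) (m + 1) := (C_succ board r m).symm
    have hin : r + 1 < board.length + 1 := by omega
    have hjn : m + 1 < (board.headD []).length + 1 := by omega
    refine ⟨shape_set hshape hin v, ?_⟩
    intro x y
    rw [tab_set hshape hin hjn v x y]
    by_cases hxy : x = r + 1 ∧ y = m + 1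
    · rw [if_pos hxy, if_pos (by unfold ProcP; omega), hxy.1, hxy.2, hvC]
    · rw [if_neg hxy, htab x y]
      have hiff : ProcP (board.headD []).length (r + 1) m x y ↔
          ProcP (board.headD []).length (r + 1) (m + 1) x y := by
        unfold ProcP
        omega
      rw [if_congr hiff rfl rfl]

lemma pouter (board : List (List Int)) : ∀ (k : Nat), k ≤ board.length →
    PInv board (k + 1) 0
      ((List.range k).foldl
        (fun P i => (List.range (board.headD []).length).foldl (pstep board i) P)
        ((List.range (board.length + 1)).map
          (fun _ => List.replicate ((board.headD []).length + 1) (0 : Int)))) := by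
  intro k
  induction k with
  | zero =>
    intro _
    simp only [List.range_zero, List.foldl_nil]
    constructor
    · constructor
      · rw [List.length_map, List.length_range]
      · intro row hrow
        obtain ⟨x, -, rfl⟩ := List.mem_map.1 hrow
        exact List.length_replicate
    · intro a b
      have h0 : tab (dp0 board.length (board.headD []).length) a b = 0 := tab_dp0 _ _ a b
      unfold dp0 at h0
      rw [h0, if_neg (by unfold ProcP; omega)]
  | succ k ihk =>
    intro hk
    rw [show List.range (k + 1) = List.range k ++ [k] from List.range_succ, List.foldl_append]
    simp only [List.foldl_cons, List.foldl_nil]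
    obtain ⟨hshape, htab⟩ :=
      pinner board k (by omega) (board.headD []).length (le_refl _) _ (ihk (by omega))
    refine ⟨hshape, ?_⟩
    intro x y
    rw [htab x y]
    have hiff : ProcP (board.headD []).length (k + 1) (board.headD []).length x y ↔
        ProcP (board.headD []).length (k + 1 + 1) 0 x y := by
      unfold ProcP
      omega
    rw [if_congr hiff rfl rfl]

lemma buildP_tab (board : List (List Int)) {a b : Nat} (ha : a ≤ board.length)
    (hb : b ≤ (board.headD []).length) :
    ((buildP board).getD a []).getD b 0 = C board a b := by
  have h := (pouter board board.length (le_refl _)).2 a b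
  unfold tab at h
  have hB : buildP board =
      (List.range board.length).foldl
        (fun P i => (List.range (board.headD []).length).foldl (pstep board i) P)
        ((List.range (board.length + 1)).map
          (fun _ => List.replicate ((board.headD []).length + 1) (0 : Int))) := rfl
  rw [hB, h]
  by_cases ha0 : a = 0
  · rw [if_neg (by unfold ProcP; omega), ha0, C_zero_left]
  · by_cases hb0 : b = 0
    · rw [if_neg (by unfold ProcP; omega), hb0, C_zero_right]
    · rw [if_pos (by unfold ProcP; omega)]

def rowD (board : List (List Int)) (r j : Nat) : Nat → Int
  | 0 => 0
  | w + 1 => rowD board r j w + ind board r (j + w)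

def blockD (board : List (List Int)) (i j w : Nat) : Nat → Int
  | 0 => 0
  | h + 1 => blockD board i j w h + rowD board (i + h) j w

lemma rowD_eq (board : List (List Int)) (r j : Nat) : ∀ w,
    rowD board r j w =
      C board (r + 1) (j + w) - C board r (j + w) - C board (r + 1) j + C board r j := by
  intro w
  induction w with
  | zero => simp [rowD]
  | succ w ih =>
    have hC := C_succ board r (j + w)
    rw [show j + (w + 1) = (j + w) + 1 from by omega, rowD, ih, hC]
    ring

lemma blockD_eq (board : List (List Int)) (i j w : Nat) : ∀ h,
    blockD board i j w h =
      C board (i + h) (j + w) - C board i (j + w) - C board (i + h) j + C board i j := by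
  intro h
  induction h with
  | zero => simp [blockD]
  | succ h ih =>
    rw [blockD, ih, rowD_eq, show i + (h + 1) = (i + h) + 1 from by omega]
    ring

lemma ind_bounds (board : List (List Int)) (i j : Nat) :
    0 ≤ ind board i j ∧ ind board i j ≤ 1 := by
  unfold ind
  split <;> omega

lemma rowD_bounds (board : List (List Int)) (r j : Nat) : ∀ w,
    0 ≤ rowD board r j w ∧ rowD board r j w ≤ w := by
  intro w
  induction w with
  | zero => simp [rowD]
  | succ w ih =>
    have := ind_bounds board r (j + w)
    rw [rowD]
    push_cast
    omega

lemma rowD_full (board : List (List Int)) (r j : Nat) : ∀ w,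
    rowD board r j w = w ↔ ∀ b, b < w → cellIn board r (j + b) ≠ 0 := by
  intro w
  induction w with
  | zero => simp [rowD]
  | succ w ih =>
    have hb := rowD_bounds board r j w
    have hi := ind_bounds board r (j + w)
    rw [rowD]
    constructor
    · intro h b hbw
      have hr : rowD board r j w = w ∧ ind board r (j + w) = 1 := by push_cast at h; omega
      rcases Nat.lt_or_ge b w with h' | h'
      · exact (ih.1 hr.1) b h'
      · have hbe : b = w := by omega
        subst hbe
        have := hr.2
        unfold ind at this
        by_contra hcc
        rw [if_neg (by simpa using hcc)] at this
        omega
    · intro h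
      have h1 : rowD board r j w = w := ih.2 (fun b hb' => h b (by omega))
      have h2 : ind board r (j + w) = 1 := by
        unfold ind
        rw [if_pos (h w (by omega))]
      rw [h1, h2]
      push_cast
      ring
lemma blockD_bounds (board : List (List Int)) (i j w : Nat) : ∀ h,
    0 ≤ blockD board i j w h ∧ blockD board i j w h ≤ (h : Int) * (w : Int) := by
  intro h
  induction h with
  | zero => simp [blockD]
  | succ h ih =>
    have := rowD_bounds board (i + h) j w
    rw [blockD]
    push_cast
    constructor
    · omega
    · nlinarith [ih.2]

lemma blockD_full (board : List (List Int)) (i j w : Nat) : ∀ h,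
    blockD board i j w h = (h : Int) * (w : Int) ↔
      ∀ a, a < h → rowD board (i + a) j w = w := by
  intro h
  induction h with
  | zero => simp [blockD]
  | succ h ih =>
    have hbb := blockD_bounds board i j w h
    have hrb := rowD_bounds board (i + h) j w
    rw [blockD]
    constructor
    · intro heq a ha
      have hsplit : blockD board i j w h = (h : Int) * (w : Int) ∧
          rowD board (i + h) j w = w := by
        push_cast at heq
        constructor <;> nlinarith
      rcases Nat.lt_or_ge a h with h' | h'
      · exact (ih.1 hsplit.1) a h'
      · have : a = h := by omega
        subst this
        exact hsplit.2
    · intro hall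
      rw [ih.2 (fun a ha => hall a (by omega)), hall h (by omega)]
      push_cast
      ring

lemma SqTL_iff_blockD (board : List (List Int)) (i j s : Nat) :
    SqTL board i j s ↔ blockD board i j s s = (s : Int) * (s : Int) := by
  rw [blockD_full]
  unfold SqTL
  constructor
  · intro h a ha
    exact (rowD_full board (i + a) j s).2 (fun b hb => h a b ha hb)
  · intro h a b ha hb
    exact (rowD_full board (i + a) j s).1 (h a ha) b hb

lemma sqCheck_iff (board : List (List Int)) {i j s : Nat}
    (hi : i + s ≤ board.length) (hj : j + s ≤ (board.headD []).length) :
    sqCheck (buildP board) i j s = true ↔ SqTL board i j s := by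
  unfold sqCheck
  rw [buildP_tab board (by omega) (by omega), buildP_tab board (by omega) (by omega),
    buildP_tab board (by omega) (by omega), buildP_tab board (by omega) (by omega)]
  rw [beq_iff_eq, SqTL_iff_blockD, blockD_eq]

lemma sqScan_iff (board : List (List Int)) {s : Nat}
    (hs : 1 ≤ s) (hsr : s ≤ board.length) (hsc : s ≤ (board.headD []).length) :
    sqScan (buildP board) board.length (board.headD []).length s = true ↔
      ∃ x y, SqTL board x y s := by
  unfold sqScan
  simp only [List.any_eq_true, List.mem_range]
  constructor
  · rintro ⟨x, hx, y, hy, hchk⟩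
    exact ⟨x, y, (sqCheck_iff board (by omega) (by omega)).1 hchk⟩
  · rintro ⟨x, y, h⟩
    have hb := SqTL_bounds hs h
    exact ⟨x, by omega, y, by omega, (sqCheck_iff board (by omega) (by omega)).2 h⟩
def Amax (board : List (List Int)) : Int :=
  (List.range' 1 board.length).foldl
    (fun acc i => (List.range' 1 (board.headD []).length).foldl
      (fun acc j => max acc (F board i j)) acc) 0

def AL (board : List (List Int)) : List Int :=
  (List.range' 1 board.length).flatMap
    (fun i => (List.range' 1 (board.headD []).length).map (F board i))

lemma Amax_eq_flat (board : List (List Int)) : Amax board = (AL board).foldl max 0 :=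
  nested_foldl_max _ _ _ _

lemma Amax_nonneg (board : List (List Int)) : 0 ≤ Amax board := by
  rw [Amax_eq_flat]; exact foldl_max_init _ 0

lemma F_le_Amax (board : List (List Int)) {i j : Nat} (h1 : 1 ≤ i) (h2 : i ≤ board.length)
    (h3 : 1 ≤ j) (h4 : j ≤ (board.headD []).length) : F board i j ≤ Amax board := by
  rw [Amax_eq_flat]
  refine foldl_max_le_of_mem ?_ 0
  refine List.mem_flatMap.2 ⟨i, ?_, List.mem_map.2 ⟨j, ?_, rfl⟩⟩
  · rw [List.mem_range'_1]; omega
  · rw [List.mem_range'_1]; omega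

lemma Amax_attained (board : List (List Int)) :
    Amax board = 0 ∨ ∃ i j, 1 ≤ i ∧ i ≤ board.length ∧ 1 ≤ j ∧ j ≤ (board.headD []).length ∧
      Amax board = F board i j := by
  rcases foldl_max_attained (AL board) 0 with h | h
  · left; rw [Amax_eq_flat]; exact h
  · right
    obtain ⟨i, hi, hx⟩ := List.mem_flatMap.1 h
    obtain ⟨j, hj, hF⟩ := List.mem_map.1 hx
    rw [List.mem_range'_1] at hi hj
    exact ⟨i, j, by omega, by omega, by omega, by omega, by rw [Amax_eq_flat, ← hF]⟩

lemma good_le_Amax (board : List (List Int)) {s : Nat} (hs : 1 ≤ s)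
    (h : ∃ x y, SqTL board x y s) : (s : Int) ≤ Amax board := by
  obtain ⟨x, y, hxy⟩ := h
  have hsq := SqTL_to_Sq hxy
  have hb := Sq_bounds hs hsq
  exact le_trans ((F_iff board (x + s) (y + s) s).2 hsq)
    (F_le_Amax board hb.1 hb.2.1 hb.2.2.1 hb.2.2.2)

lemma sqLoop_eq (board : List (List Int)) (N : Nat)
    (hgood : 1 ≤ N → ∃ x y, SqTL board x y N)
    (hle : ∀ s : Nat, 1 ≤ s → (∃ x y, SqTL board x y s) → (s : Int) ≤ (N : Int)) :
    ∀ k, N ≤ k → k ≤ board.length → k ≤ (board.headD []).length →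
      sqLoop (buildP board) board.length (board.headD []).length k = (N : Int) * (N : Int) := by
  intro k
  induction k with
  | zero =>
    intro hk _ _
    have : N = 0 := by omega
    subst this
    simp [sqLoop]
  | succ k ihk =>
    intro hk hkr hkc
    rw [sqLoop]
    by_cases hN : N = k + 1
    · have hscan : sqScan (buildP board) board.length (board.headD []).length (k + 1) = true :=
        (sqScan_iff board (by omega) hkr hkc).2 (hN ▸ hgood (by omega))
      rw [if_pos hscan]
      subst hN
      push_cast
      ring
    · have hscan : sqScan (buildP board) board.length (board.headD []).length (k + 1) ≠ true := by
        intro h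
        have := hle (k + 1) (by omega) ((sqScan_iff board (by omega) hkr hkc).1 h)
        have : k + 1 ≤ N := by exact_mod_cast this
        omega
      rw [if_neg hscan]
      exact ihk (by omega) (by omega) (by omega)
lemma solution_eq_Amax (board : List (List Int)) : solution board = Amax board ^ 2 := by
  have hrfl : solution board =
      ((List.range' 1 board.length).foldl
        (fun st i => (List.range' 1 (board.headD []).length).foldl (istep board i) st)
        (dp0 (max board.length (board.headD []).length) (max board.length (board.headD []).length), (0 : Int))).2 ^ 2 := rfl
  obtain ⟨-, hans, -⟩ := outer_inv board board.length (le_refl _)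
  rw [hrfl, hans]
  rfl

lemma alt_eq_loop (board : List (List Int)) :
    solution_alt board =
      sqLoop (buildP board) board.length (board.headD []).length
        (min board.length (board.headD []).length) := rfl

lemma solution_eq_alt : ∀ (board : List (List Int)), solution board = solution_alt board := by
  intro board
  have hA0 := Amax_nonneg board
  set N := (Amax board).toNat with hNdef
  have hNcast : (N : Int) = Amax board := Int.toNat_of_nonneg hA0
  have hgood : 1 ≤ N → ∃ x y, SqTL board x y N := by
    intro hN
    rcases Amax_attained board with h | ⟨i, j, h1, h2, h3, h4, hF⟩
    · omega
    · have hsq : Sq board i j N := (F_iff board i j N).1 (by rw [hNcast, hF])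
      exact ⟨i - N, j - N, hsq.2.2⟩
  have hle : ∀ s : Nat, 1 ≤ s → (∃ x y, SqTL board x y s) → (s : Int) ≤ (N : Int) := by
    intro s hs h
    rw [hNcast]
    exact good_le_Amax board hs h
  have hNb : N ≤ board.length ∧ N ≤ (board.headD []).length := by
    rcases Nat.eq_zero_or_pos N with h | h
    · omega
    · obtain ⟨x, y, hxy⟩ := hgood h
      have := SqTL_bounds h hxy
      omega
  have halt : solution_alt board = (N : Int) * (N : Int) := by
    rw [alt_eq_loop]
    exact sqLoop_eq board N hgood hle (min board.length (board.headD []).length)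
      (by omega) (Nat.min_le_left _ _) (Nat.min_le_right _ _)
  rw [solution_eq_Amax, halt, ← hNcast]
  ring

-- ===== VERDICT (by name: the statement is the Claim_ definition above) =====
theorem solution_spec : Claim_equal_solution := by
  intro board _ _
  exact solution_eq_alt board
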